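-- pv_equiv track=rewrite | github.com/sokurii/SWEA | stack/고대유적.py | count
-- ===== SOURCE A (Python) =====
-- def count(ground):
--     max_v = 2 # 최소길이
--     for lst in ground:
--         cnt = 0
--         for i in lst:
--             if i==1: # 1이 연속해서 존재하면 +=1
--                 cnt+=1
--                 if max_v<cnt:
--                     max_v = cnt
--             else: # 아니라면 cnt 초기화
--                 cnt=0
--     return max_v
-- ===== SOURCE B (Python) =====
-- def count(ground):
--     best = 2
--     for row in ground:
--         i, n = 0, len(row)
--         while i < n:
--             if row[i] == 1:
--                 j = i
--                 while j < n and row[j] == 1: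
--                     j += 1
--                 best = max(best, j - i)
--                 i = j
--             else:
--                 i += 1
--     return best
-- ===== Notes on version B (the rewrite author's own statement) =====
-- stated objective: alternative
-- what changed: B replaces A's per-element counter with an else-reset and inline max update by an index-jumping run scan: on hitting a 1 it walks to the end of that maximal run, takes max(best, run length) once per run, and resumes after the run.
import Mathlib
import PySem

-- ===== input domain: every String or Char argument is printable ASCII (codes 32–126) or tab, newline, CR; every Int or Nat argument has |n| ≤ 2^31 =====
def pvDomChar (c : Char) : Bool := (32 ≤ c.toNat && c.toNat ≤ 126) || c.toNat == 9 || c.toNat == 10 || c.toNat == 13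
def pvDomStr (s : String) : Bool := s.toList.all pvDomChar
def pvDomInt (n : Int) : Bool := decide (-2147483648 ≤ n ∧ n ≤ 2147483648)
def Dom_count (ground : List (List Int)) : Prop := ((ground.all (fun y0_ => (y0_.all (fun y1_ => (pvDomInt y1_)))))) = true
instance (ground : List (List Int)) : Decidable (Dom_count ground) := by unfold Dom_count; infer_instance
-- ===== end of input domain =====

-- B replaces A's per-element counter with explicit run extraction (jump over each maximal 1-run and take its length); objective: simpler/alternative, same cost.


-- ===== PORT A =====
-- inner-loop body of A: state (max_v, cnt)
def stepA (s : Int × Int) (i : Int) : Int × Int :=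
  if i == 1 then
    let cnt := s.2 + 1
    (if s.1 < cnt then cnt else s.1, cnt)
  else (s.1, 0)

def count (ground : List (List Int)) : Int :=
  ground.foldl (fun max_v lst => (lst.foldl stepA (max_v, 0)).1) 2

-- ===== PORT B =====
-- B's while-loop over indices, as recursion on the remaining suffix:
-- on a 1, take the whole run (takeWhile = the inner while j loop), record its length, continue after it.
def runScan : List Int → Int → Int
  | [], best => best
  | x :: xs, best =>
    if h : x == 1 then
      runScan ((x :: xs).dropWhile (fun e => e == 1))
              (max best (((x :: xs).takeWhile (fun e => e == 1)).length : Int))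
    else runScan xs best
termination_by l _ => l.length
decreasing_by
  · simp only [List.dropWhile_cons, h, if_true, List.length_cons]
    exact Nat.lt_succ_of_le (List.length_dropWhile_le _ _)
  · simp

def count_alt (ground : List (List Int)) : Int :=
  ground.foldl (fun best row => runScan row best) 2

-- ===== PRECONDITION & SPEC =====
def Spec_count (ground : List (List Int)) (out : Int) : Prop := out = count_alt ground
instance (ground : List (List Int)) (out : Int) : Decidable (Spec_count ground out) := by unfold Spec_count; infer_instance

-- ===== CLAIM (what is proved, stated in full; the proofs are below) =====
def Claim_equal_count : Prop := ∀ (ground : List (List Int)), Dom_count ground → Spec_count ground (count ground)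

-- ===== LEMMAS AND PROOFS =====

theorem if_max (m c : Int) : (if max m c < c + 1 then c + 1 else max m c) = max m (c + 1) := by
  rcases max_cases m c with ⟨h1, h2⟩ | ⟨h1, h2⟩ <;> rcases max_cases m (c + 1) with ⟨h3, h4⟩ | ⟨h3, h4⟩ <;>
    rw [h1, h3] <;> split_ifs <;> omega

theorem stepA_one (m c : Int) : stepA (max m c, c) 1 = (max m (c + 1), c + 1) := by
  simp only [stepA, BEq.rfl, if_true]
  exact congrArg (·, c + 1) (if_max m c)

theorem stepA_one0 (b : Int) : stepA (b, 0) 1 = (max b 1, 1) := by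
  simp only [stepA, BEq.rfl, if_true, zero_add]
  have : (if b < 1 then 1 else b) = max b 1 := by
    rcases max_cases b 1 with ⟨h1, h2⟩ | ⟨h1, h2⟩ <;> rw [h1] <;> split_ifs <;> omega
  exact congrArg (·, 1) this

theorem stepA_ne (m c x : Int) (hx : x ≠ 1) : stepA (m, c) x = (m, 0) := by
  simp [stepA, hx]

-- processing a run of k ones: the counter advances by k and the max absorbs c+k
theorem foldA_ones (k : Nat) : ∀ (rest : List Int) (m c : Int),
    List.foldl stepA (max m c, c) (List.replicate k 1 ++ rest)
    = List.foldl stepA (max m (c + k), c + k) rest := by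
  induction k with
  | zero => intro rest m c; simp
  | succ k ih =>
    intro rest m c
    calc List.foldl stepA (max m c, c) (List.replicate (k + 1) 1 ++ rest)
        = List.foldl stepA (max m (c + 1), c + 1) (List.replicate k 1 ++ rest) := by
          simp only [List.replicate_succ, List.cons_append, List.foldl_cons, stepA_one]
      _ = List.foldl stepA (max m ((c + 1) + k), (c + 1) + k) rest := ih rest m (c + 1)
      _ = List.foldl stepA (max m (c + (k + 1 : Nat)), c + (k + 1 : Nat)) rest := by
          push_cast; ring_nf

-- when the remaining list is empty or starts with a non-1, the counter component is irrelevant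
theorem foldA_reset (rest : List Int) (m c : Int)
    (h : rest = [] ∨ ∃ y t, rest = y :: t ∧ y ≠ 1) :
    (List.foldl stepA (m, c) rest).1 = (List.foldl stepA (m, 0) rest).1 := by
  rcases h with h | ⟨y, t, rfl, hy⟩
  · simp [h]
  · rw [List.foldl_cons, List.foldl_cons, stepA_ne m c y hy, stepA_ne m 0 y hy]

theorem dropWhile_shape (l : List Int) :
    l.dropWhile (fun e => e == 1) = [] ∨
    ∃ y t, l.dropWhile (fun e => e == 1) = y :: t ∧ y ≠ 1 := by
  induction l with
  | nil => left; rfl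
  | cons x xs ih =>
    by_cases hx : x = 1
    · simpa [List.dropWhile_cons, hx] using ih
    · right; exact ⟨x, xs, by simp [List.dropWhile_cons, hx], hx⟩

theorem takeWhile_replicate (l : List Int) :
    l.takeWhile (fun e => e == 1)
    = List.replicate (l.takeWhile (fun e => e == 1)).length 1 := by
  induction l with
  | nil => rfl
  | cons x xs ih =>
    by_cases hx : x = 1
    · simp only [List.takeWhile_cons, hx, BEq.rfl, if_true, List.length_cons, List.replicate_succ]
      exact congrArg (List.cons 1) ih
    · simp [List.takeWhile_cons, hx]

-- main per-row lemma: A's inner fold equals B's run scan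
theorem row_main : ∀ (n : Nat) (row : List Int), row.length ≤ n →
    ∀ b, (List.foldl stepA (b, 0) row).1 = runScan row b := by
  intro n
  induction n with
  | zero =>
    intro row h b
    have hrow : row = [] := List.eq_nil_of_length_eq_zero (Nat.le_zero.mp h)
    subst hrow
    rw [runScan]
    rfl
  | succ n ih =>
    intro row h b
    match row with
    | [] => rw [runScan]; rfl
    | x :: xs =>
      by_cases hx : x = 1
      · subst hx
        set r := (xs.takeWhile (fun e => e == (1 : Int))).length with hr
        set rest := xs.dropWhile (fun e => e == (1 : Int)) with hrest
        have hx2 : xs = List.replicate r 1 ++ rest := by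
          conv_lhs => rw [← List.takeWhile_append_dropWhile (p := fun e => e == (1 : Int)) (l := xs)]
          congr 1
          rw [hr]
          exact takeWhile_replicate xs
        have hlen : rest.length ≤ n := by
          have h1 := List.length_dropWhile_le (fun e => e == (1 : Int)) xs
          have h2 : xs.length ≤ n := by simpa using h
          rw [← hrest] at h1; omega
        have hlhs : (List.foldl stepA (b, 0) (1 :: xs)).1
            = (List.foldl stepA (max b (1 + r), 0) rest).1 := by
          rw [List.foldl_cons, stepA_one0, hx2, foldA_ones]
          exact foldA_reset _ _ _ (by rw [hrest]; exact dropWhile_shape xs)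
        rw [hlhs, ih rest hlen]
        rw [runScan]
        simp only [BEq.rfl, dite_true]
        have h1 : (1 :: xs).dropWhile (fun e => e == (1 : Int)) = rest := by
          simp [List.dropWhile_cons, hrest]
        have h2 : (((1 :: xs).takeWhile (fun e => e == (1 : Int))).length : Int) = 1 + r := by
          simp only [List.takeWhile_cons, BEq.rfl, if_true, List.length_cons, hr]
          push_cast; ring
        rw [h1, h2]
      · rw [List.foldl_cons, stepA_ne b 0 x hx,
            ih xs (by simpa using h) b, runScan]
        simp [hx]

theorem outer (gs : List (List Int)) : ∀ b,
    gs.foldl (fun max_v lst => (lst.foldl stepA (max_v, 0)).1) b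
    = gs.foldl (fun best row => runScan row best) b := by
  induction gs with
  | nil => intro b; rfl
  | cons g t ih =>
    intro b
    rw [List.foldl_cons, List.foldl_cons, row_main g.length g (le_refl _) b, ih]

-- ===== VERDICT (by name: the statement is the Claim_ definition above) =====
theorem count_spec : Claim_equal_count := by
  intro ground _
  unfold Spec_count count count_alt
  exact outer ground 2
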